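-- pv_equiv track=rewrite | github.com/2025-II-Infra-ADAII/proyecto-i-ada-ii-funcionaperonocompila-e | src/utils.py | calcular_costo
-- ===== SOURCE A (Python) =====
-- def calcular_costo(finca, permutacion):
--
--     """
--     con esta funcion calcularemos el costo total que tarda una finca en regarse
--     se espera la lista de tuplas finca: (ts, tr, p) y la
--     permutacion: lista con el orden de los tablones [0, 1, 2]
--     """
--
--     tiempo_actual = 0
--     costo_total = 0
--
--     for i in permutacion:
--         ts, tr, p = finca[i]
--         fin_riego = tiempo_actual + tr
--         retraso = max(0, fin_riego - ts)
--         costo_total += p * retraso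
--         tiempo_actual += tr
--
--     return costo_total
-- ===== SOURCE B (Python) =====
-- def calcular_costo(finca, permutacion):
--     # Total irrigation time = completion time of the LAST tablon.
--     end = sum(finca[i][1] for i in permutacion)
--     # Walk the permutation backwards: each tablon's completion time is
--     # obtained by subtracting the durations of the tablones after it.
--     costo = 0
--     for i in reversed(permutacion):
--         ts, tr, p = finca[i]
--         costo += p * max(0, end - ts)
--         end -= tr
--     return costo
-- ===== Notes on version B (the rewrite author's own statement) =====
-- stated objective: alternative
-- what changed: B traverses the permutation back-to-front: it first computes the grand-total irrigation time, then walks the order in reverse, deriving each completion time by subtracting durations from the total, whereas A accumulates completion times forward while summing the cost.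
import Mathlib
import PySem

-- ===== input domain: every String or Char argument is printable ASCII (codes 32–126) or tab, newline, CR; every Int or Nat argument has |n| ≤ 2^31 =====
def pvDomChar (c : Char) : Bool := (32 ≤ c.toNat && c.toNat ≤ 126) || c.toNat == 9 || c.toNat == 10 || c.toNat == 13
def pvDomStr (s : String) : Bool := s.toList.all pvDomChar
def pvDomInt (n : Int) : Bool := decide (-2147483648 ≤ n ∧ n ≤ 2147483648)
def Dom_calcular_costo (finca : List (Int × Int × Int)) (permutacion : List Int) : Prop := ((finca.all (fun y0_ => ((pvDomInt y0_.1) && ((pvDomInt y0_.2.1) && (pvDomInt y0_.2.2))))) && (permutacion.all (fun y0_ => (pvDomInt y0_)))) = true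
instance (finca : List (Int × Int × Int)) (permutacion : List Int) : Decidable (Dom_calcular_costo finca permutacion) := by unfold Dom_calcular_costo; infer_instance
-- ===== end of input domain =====

-- ===== PORT A =====
-- B walks the permutation back-to-front, deriving completion times by subtraction
-- from the grand total, instead of A's forward accumulation (objective: alternative).
-- finca[i] with Python (possibly negative) indexing; default only reachable outside Pre_.
def pvElem (finca : List (Int × Int × Int)) (i : Int) : Int × Int × Int :=
  (PySem.List.pyGet? finca i).getD (0, 0, 0)

def calcular_costo (finca : List (Int × Int × Int)) (permutacion : List Int) : Int :=
  (permutacion.foldl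
    (fun (s : Int × Int) i =>
      let e := pvElem finca i
      let fin_riego := s.1 + e.2.1
      let retraso := max 0 (fin_riego - e.1)
      (s.1 + e.2.1, s.2 + e.2.2 * retraso))
    (0, 0)).2

-- ===== PORT B =====
def calcular_costo_alt (finca : List (Int × Int × Int)) (permutacion : List Int) : Int :=
  let total := (permutacion.map (fun i => (pvElem finca i).2.1)).sum
  (permutacion.reverse.foldl
    (fun (s : Int × Int) i =>
      let e := pvElem finca i
      (s.1 - e.2.1, s.2 + e.2.2 * max 0 (s.1 - e.1)))
    (total, 0)).2

-- ===== PRECONDITION & SPEC =====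
-- Pre_: every index in permutacion is a valid Python index into finca (A raises IndexError otherwise).
def Pre_calcular_costo (finca : List (Int × Int × Int)) (permutacion : List Int) : Prop :=
  ∀ i ∈ permutacion, -(finca.length : Int) ≤ i ∧ i < finca.length
instance (finca : List (Int × Int × Int)) (permutacion : List Int) : Decidable (Pre_calcular_costo finca permutacion) := by unfold Pre_calcular_costo; infer_instance

def pvWitness_calcular_costo : (List (Int × Int × Int)) × List Int := ([(2, 3, 4), (1, 2, 5)], [1, 0])

def Spec_calcular_costo (finca : List (Int × Int × Int)) (permutacion : List Int) (out : Int) : Prop := out = calcular_costo_alt finca permutacion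
instance (finca : List (Int × Int × Int)) (permutacion : List Int) (out : Int) : Decidable (Spec_calcular_costo finca permutacion out) := by unfold Spec_calcular_costo; infer_instance

-- ===== CLAIM (what is proved, stated in full; the proofs are below) =====
def Claim_equal_calcular_costo : Prop := ∀ (finca : List (Int × Int × Int)) (permutacion : List Int), Dom_calcular_costo finca permutacion → Pre_calcular_costo finca permutacion → Spec_calcular_costo finca permutacion (calcular_costo finca permutacion)

-- ===== LEMMAS AND PROOFS =====

-- forward cost from start time t (characterises A's fold)
def pvCost (finca : List (Int × Int × Int)) (t : Int) : List Int → Int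
  | [] => 0
  | i :: r =>
      (pvElem finca i).2.2 * max 0 (t + (pvElem finca i).2.1 - (pvElem finca i).1)
        + pvCost finca (t + (pvElem finca i).2.1) r

-- backward cost from end time e (characterises B's fold)
def pvRCost (finca : List (Int × Int × Int)) (e : Int) : List Int → Int
  | [] => 0
  | i :: r =>
      (pvElem finca i).2.2 * max 0 (e - (pvElem finca i).1)
        + pvRCost finca (e - (pvElem finca i).2.1) r

def pvSumTr (finca : List (Int × Int × Int)) (l : List Int) : Int :=
  (l.map (fun i => (pvElem finca i).2.1)).sum

theorem pvFoldA (finca : List (Int × Int × Int)) :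
    ∀ (l : List Int) (t c : Int),
      (l.foldl (fun (s : Int × Int) i =>
          let e := pvElem finca i
          let fin_riego := s.1 + e.2.1
          let retraso := max 0 (fin_riego - e.1)
          (s.1 + e.2.1, s.2 + e.2.2 * retraso)) (t, c)).2
        = c + pvCost finca t l := by
  intro l
  induction l with
  | nil => intro t c; simp [pvCost]
  | cons i r ih => intro t c; simp only [List.foldl, pvCost, ih]; ring

theorem pvFoldB (finca : List (Int × Int × Int)) :
    ∀ (l : List Int) (e c : Int),
      (l.foldl (fun (s : Int × Int) i =>
          let x := pvElem finca i
          (s.1 - x.2.1, s.2 + x.2.2 * max 0 (s.1 - x.1))) (e, c)).2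
        = c + pvRCost finca e l := by
  intro l
  induction l with
  | nil => intro e c; simp [pvRCost]
  | cons i r ih => intro e c; simp only [List.foldl, pvRCost, ih]; ring

theorem pvRCost_append_single (finca : List (Int × Int × Int)) :
    ∀ (xs : List Int) (e i : Int),
      pvRCost finca e (xs ++ [i])
        = pvRCost finca e xs
          + (pvElem finca i).2.2 * max 0 ((e - pvSumTr finca xs) - (pvElem finca i).1) := by
  intro xs
  induction xs with
  | nil => intro e i; simp [pvRCost, pvSumTr]
  | cons j r ih =>
      intro e i
      simp only [List.cons_append, pvRCost, ih, pvSumTr, List.map_cons, List.sum_cons]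
      ring_nf
  
theorem pvRev (finca : List (Int × Int × Int)) :
    ∀ (l : List Int) (t : Int),
      pvRCost finca (t + pvSumTr finca l) l.reverse = pvCost finca t l := by
  intro l
  induction l with
  | nil => intro t; simp [pvCost, pvRCost]
  | cons i r ih =>
      intro t
      have hs : pvSumTr finca r.reverse = pvSumTr finca r := by
        simp [pvSumTr]
      rw [List.reverse_cons, pvRCost_append_single, hs]
      simp only [pvCost, pvSumTr, List.map_cons, List.sum_cons]
      rw [pvSumTr] at ih
      have h1 : t + ((pvElem finca i).2.1 + (List.map (fun i => (pvElem finca i).2.1) r).sum)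
           = (t + (pvElem finca i).2.1) + (List.map (fun i => (pvElem finca i).2.1) r).sum := by ring
      have h2 : t + ((pvElem finca i).2.1 + (List.map (fun i => (pvElem finca i).2.1) r).sum)
              - (List.map (fun i => (pvElem finca i).2.1) r).sum - (pvElem finca i).1
           = t + (pvElem finca i).2.1 - (pvElem finca i).1 := by ring
      rw [h2, h1, ih]
      ring

-- ===== VERDICT (by name: the statement is the Claim_ definition above) =====
theorem calcular_costo_spec : Claim_equal_calcular_costo := by
  intro finca permutacion _ _
  unfold Spec_calcular_costo calcular_costo calcular_costo_alt
  rw [pvFoldA, pvFoldB]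
  have := pvRev finca permutacion 0
  simp only [zero_add] at this
  rw [pvSumTr] at this
  rw [this]
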